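-- pv_equiv track=rewrite | github.com/isaacgrove/advent-of-code | day_11/day11_part2.py | look_down
-- ===== SOURCE A (Python) =====
-- def look_down(i,j,lst):
--     if i + 1 <= (len(lst) - 1):
--         if lst[i+1][j] == 2:
--             return 1
--         elif lst[i+1][j] == 1:
--             return 0
--         else:
--             return look_down(i+1, j, lst)
--     else:
--         return 0
-- ===== SOURCE B (Python) =====
-- def look_down(i, j, lst):
--     for k in range(i + 1, len(lst)):
--         cell = lst[k][j]
--         if cell == 2:
--             return 1
--         if cell == 1:
--             return 0
--     return 0
-- ===== Notes on version B (the rewrite author's own statement) =====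
-- stated objective: idiomatic
-- what changed: Replaces the tail recursion over row indices with an explicit linear scan 'for k in range(i+1, len(lst))' that returns at the first seat and falls through to 0.
-- outside the precondition, e.g. on look_down(0, 1, [[5], [1, 2]]): A returns 1, B returns 1
import Mathlib
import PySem

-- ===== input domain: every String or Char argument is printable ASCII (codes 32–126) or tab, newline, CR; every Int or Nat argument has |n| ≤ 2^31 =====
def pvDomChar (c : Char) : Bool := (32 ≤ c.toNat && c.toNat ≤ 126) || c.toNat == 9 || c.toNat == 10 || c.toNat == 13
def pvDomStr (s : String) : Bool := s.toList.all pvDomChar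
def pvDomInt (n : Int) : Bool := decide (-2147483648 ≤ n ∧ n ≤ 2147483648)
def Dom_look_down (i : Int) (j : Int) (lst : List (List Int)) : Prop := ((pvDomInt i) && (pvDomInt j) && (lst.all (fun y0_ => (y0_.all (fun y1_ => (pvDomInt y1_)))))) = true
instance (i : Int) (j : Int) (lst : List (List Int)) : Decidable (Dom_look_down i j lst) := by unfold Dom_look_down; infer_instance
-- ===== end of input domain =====

-- B replaces A's tail recursion by an explicit linear scan over range(i+1, len(lst)) (idiomatic; return value only).

-- ===== PORT A =====
def look_down (i : Int) (j : Int) (lst : List (List Int)) : Int :=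
  if h : i + 1 ≤ (lst.length : Int) - 1 then
    let cell := ((PySem.List.pyGet? lst (i+1)).bind (fun row => PySem.List.pyGet? row j)).getD 0
    if cell == 2 then 1
    else if cell == 1 then 0
    else look_down (i+1) j lst
  else 0
termination_by ((lst.length : Int) - 1 - i).toNat
decreasing_by omega

-- ===== PORT B =====
-- the 'for k in …: … return …' loop of Source B, recursing on the list of indices
def lookDownLoop (j : Int) (lst : List (List Int)) : List Int → Int
  | [] => 0
  | k :: ks =>
    let cell := ((PySem.List.pyGet? lst k).bind (fun row => PySem.List.pyGet? row j)).getD 0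
    if cell == 2 then 1
    else if cell == 1 then 0
    else lookDownLoop j lst ks

def look_down_alt (i : Int) (j : Int) (lst : List (List Int)) : Int :=
  lookDownLoop j lst (PySem.List.pyRange (i+1) (lst.length : Int) 1)

-- ===== PRECONDITION & SPEC =====
-- Pre_ excludes the inputs where Python A raises IndexError: it requires either that the scan is
-- empty, or that the start row index is in range and every row has column j in range.  This is
-- slightly narrower than "A returns": it also excludes inputs where a seat stops the scan before
-- a too-short row is reached (there A and B return the same value).
def Pre_look_down (i : Int) (j : Int) (lst : List (List Int)) : Prop :=
  (lst.length : Int) ≤ i + 1 ∨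
    (-(lst.length : Int) ≤ i + 1 ∧ ∀ row ∈ lst, PySem.Raise.InRange row.length j)
instance (i : Int) (j : Int) (lst : List (List Int)) : Decidable (Pre_look_down i j lst) := by
  unfold Pre_look_down; infer_instance
def pvWitness_look_down : Int × Int × List (List Int) := (0, 0, [[0], [2]])

def Spec_look_down (i : Int) (j : Int) (lst : List (List Int)) (out : Int) : Prop := out = look_down_alt i j lst
instance (i : Int) (j : Int) (lst : List (List Int)) (out : Int) : Decidable (Spec_look_down i j lst out) := by unfold Spec_look_down; infer_instance

-- ===== CLAIM (what is proved, stated in full; the proofs are below) =====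
def Claim_equal_look_down : Prop := ∀ (i : Int) (j : Int) (lst : List (List Int)), Dom_look_down i j lst → Pre_look_down i j lst → Spec_look_down i j lst (look_down i j lst)

-- ===== LEMMAS AND PROOFS =====

-- A's recursion equals B's scan of the remaining indices, for every input.
lemma look_down_eq_loop (j : Int) (lst : List (List Int)) :
    ∀ (n : Nat) (i : Int), ((lst.length : Int) - 1 - i).toNat ≤ n →
      look_down i j lst = lookDownLoop j lst (PySem.List.pyRange (i+1) (lst.length : Int) 1) := by
  intro n
  induction n with
  | zero =>
    intro i h
    have hc : ¬ (i + 1 ≤ (lst.length : Int) - 1) := by omega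
    rw [look_down, PySem.List.pyRange_one_eq_nil (by omega)]
    simp [hc, lookDownLoop]
  | succ n ih =>
    intro i h
    by_cases hc : i + 1 ≤ (lst.length : Int) - 1
    · rw [look_down, PySem.List.pyRange_one_cons (by omega : i + 1 < (lst.length : Int))]
      simp only [hc, dite_true, lookDownLoop]
      split_ifs with h2 h1
      · rfl
      · rfl
      · exact ih (i+1) (by omega)
    · rw [look_down, PySem.List.pyRange_one_eq_nil (by omega)]
      simp [hc, lookDownLoop]

-- ===== VERDICT (by name: the statement is the Claim_ definition above) =====
theorem look_down_spec : Claim_equal_look_down := by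
  intro i j lst _ _
  unfold Spec_look_down look_down_alt
  exact look_down_eq_loop j lst _ i le_rfl
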